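-- pv_equiv track=rewrite | github.com/brandoneng000/LeetCode | medium/2420.py | goodIndices
-- ===== SOURCE A (Python) =====
-- from typing import List
--
-- def goodIndices(nums: List[int], k: int) -> List[int]:
--     n = len(nums)
--     res = []
--     forward = [False] * n
--     stack = []
--
--     for i in range(n):
--         if len(stack) >= k:
--             forward[i] = True
--         if not stack:
--             stack.append(nums[i])
--         else:
--             if nums[i] <= stack[-1]:
--                 stack.append(nums[i])
--             else:
--                 stack = [nums[i]]
--
--     stack = []
--     for i in range(n - 1, -1, -1):
--         if len(stack) >= k and forward[i]:
--             res.append(i)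
--         if not stack:
--             stack.append(nums[i])
--         else:
--             if nums[i] <= stack[-1]:
--                 stack.append(nums[i])
--             else:
--                 stack = [nums[i]]
--
--     return res[::-1]
-- ===== SOURCE B (Python) =====
-- from typing import List
--
-- def goodIndices(nums: List[int], k: int) -> List[int]:
--     n = len(nums)
--     if k <= 0:
--         return list(range(n))
--     # prefix counts of "order breaks": inc_breaks[t] = #{j in [1,t] : nums[j] > nums[j-1]},
--     # dec_breaks[t] = #{j in [1,t] : nums[j] < nums[j-1]}
--     inc_breaks = [0] * n
--     dec_breaks = [0] * n
--     for j in range(1, n):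
--         inc_breaks[j] = inc_breaks[j - 1] + (1 if nums[j] > nums[j - 1] else 0)
--         dec_breaks[j] = dec_breaks[j - 1] + (1 if nums[j] < nums[j - 1] else 0)
--     res = []
--     for i in range(k, n - k):
--         if inc_breaks[i - 1] == inc_breaks[i - k] and dec_breaks[i + k] == dec_breaks[i + 1]:
--             res.append(i)
--     return res
-- ===== Notes on version B (the rewrite author's own statement) =====
-- stated objective: alternative
-- what changed: Replaces A's two interleaved stack-maintaining scans (which track the current monotone run as a growing list and emit indices in reverse, undone by a final reversal) with prefix sums of order-violation indicators: one pass builds cumulative counts of non-increasing/non-decreasing breaks, then each candidate window is tested in O(1) by comparing two prefix-count values, emitting indices directly in ascending order.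
import Mathlib
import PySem

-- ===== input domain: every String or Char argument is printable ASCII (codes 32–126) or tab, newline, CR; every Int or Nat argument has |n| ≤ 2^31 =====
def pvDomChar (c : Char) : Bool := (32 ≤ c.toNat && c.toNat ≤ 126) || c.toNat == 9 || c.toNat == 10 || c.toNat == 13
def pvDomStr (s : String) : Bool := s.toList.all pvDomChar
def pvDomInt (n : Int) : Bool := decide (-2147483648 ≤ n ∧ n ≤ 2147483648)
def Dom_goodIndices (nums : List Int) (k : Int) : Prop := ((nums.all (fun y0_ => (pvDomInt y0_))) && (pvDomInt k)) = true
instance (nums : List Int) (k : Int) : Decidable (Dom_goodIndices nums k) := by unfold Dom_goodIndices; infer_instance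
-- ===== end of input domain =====

-- B replaces A's two interleaved run-tracking stack scans (with a reversed emission pass)
-- by prefix sums of order-violation indicators checked over a sliding window (alternative
-- algorithm of the same cost class; results come out ascending with no reversal).

-- ===== PORT A =====
def goodIndices (nums : List Int) (k : Int) : List Int :=
  let n : Int := (nums.length : Int)
  let res : List Int := []
  let forward : List Bool := PySem.List.pyRepeat [false] n
  let st1 :=
    (PySem.List.pyRange 0 n 1).foldl
      (fun (s : List Bool × List Int) i =>
        let forward := s.1
        let stack := s.2
        let forward := if k ≤ (stack.length : Int) then PySem.List.pySetD forward i true else forward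
        let stack :=
          if stack.isEmpty then stack ++ [PySem.List.pyGetD nums i 0]
          else if PySem.List.pyGetD nums i 0 ≤ PySem.List.pyGetD stack (-1) 0 then
            stack ++ [PySem.List.pyGetD nums i 0]
          else [PySem.List.pyGetD nums i 0]
        (forward, stack))
      (forward, ([] : List Int))
  let forward := st1.1
  let st2 :=
    (PySem.List.pyRange (n - 1) (-1) (-1)).foldl
      (fun (s : List Int × List Int) i =>
        let res := s.1
        let stack := s.2
        let res :=
          if k ≤ (stack.length : Int) ∧ PySem.List.pyGetD forward i false = true then res ++ [i]
          else res
        let stack :=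
          if stack.isEmpty then stack ++ [PySem.List.pyGetD nums i 0]
          else if PySem.List.pyGetD nums i 0 ≤ PySem.List.pyGetD stack (-1) 0 then
            stack ++ [PySem.List.pyGetD nums i 0]
          else [PySem.List.pyGetD nums i 0]
        (res, stack))
      (res, ([] : List Int))
  (PySem.List.slice? st2.1 none none (-1)).getD []

-- ===== PORT B =====
-- loop body of B's single table-building pass (writes both prefix-count tables)
def stepTab (nums : List Int) (t : List Int × List Int) (j : Int) : List Int × List Int :=
  (PySem.List.pySetD t.1 j
     (PySem.List.pyGetD t.1 (j - 1) 0 +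
       (if PySem.List.pyGetD nums (j - 1) 0 < PySem.List.pyGetD nums j 0 then 1 else 0)),
   PySem.List.pySetD t.2 j
     (PySem.List.pyGetD t.2 (j - 1) 0 +
       (if PySem.List.pyGetD nums j 0 < PySem.List.pyGetD nums (j - 1) 0 then 1 else 0)))

def goodIndices_alt (nums : List Int) (k : Int) : List Int :=
  let n : Int := (nums.length : Int)
  if k ≤ 0 then PySem.List.pyRange 0 n 1
  else
    let tabs :=
      (PySem.List.pyRange 1 n 1).foldl (stepTab nums)
        (PySem.List.pyRepeat [0] n, PySem.List.pyRepeat [0] n)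
    (PySem.List.pyRange k (n - k) 1).foldl
      (fun res i =>
        if PySem.List.pyGetD tabs.1 (i - 1) 0 = PySem.List.pyGetD tabs.1 (i - k) 0 ∧
           PySem.List.pyGetD tabs.2 (i + k) 0 = PySem.List.pyGetD tabs.2 (i + 1) 0
        then res ++ [i] else res)
      []

-- ===== PRECONDITION & SPEC =====
def Spec_goodIndices (nums : List Int) (k : Int) (out : List Int) : Prop := out = goodIndices_alt nums k
instance (nums : List Int) (k : Int) (out : List Int) : Decidable (Spec_goodIndices nums k out) := by unfold Spec_goodIndices; infer_instance

-- ===== CLAIM (what is proved, stated in full; the proofs are below) =====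
def Claim_equal_goodIndices : Prop := ∀ (nums : List Int) (k : Int), Dom_goodIndices nums k → Spec_goodIndices nums k (goodIndices nums k)

-- ===== LEMMAS AND PROOFS =====

-- `pushRun` is the shared stack-update step of both of A's loops.
def pushRun (s : List Int) (x : Int) : List Int :=
  if s.isEmpty then s ++ [x]
  else if x ≤ PySem.List.pyGetD s (-1) 0 then s ++ [x]
  else [x]

-- stack after feeding g 0, g 1, …, g (p-1)
def stkF (g : ℕ → Int) : ℕ → List Int
  | 0 => []
  | p + 1 => pushRun (stkF g p) (g p)

-- length of the non-increasing run ending at position p-1 of the stream g (0 for p = 0)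
def runF (g : ℕ → Int) : ℕ → ℕ
  | 0 => 0
  | 1 => 1
  | p + 2 => if g (p + 1) ≤ g p then runF g (p + 1) + 1 else 1

-- the element stream of A's forward pass
def gFw (nums : List Int) : ℕ → Int := fun j => nums.getD j 0
-- the element stream of A's backward pass (read from the right)
def gBw (nums : List Int) : ℕ → Int := fun j => nums.getD (nums.length - 1 - j) 0

def stepFwd (nums : List Int) (k : Int) (s : List Bool × List Int) (i : Int) : List Bool × List Int :=
  let forward := s.1
  let stack := s.2
  let forward := if k ≤ (stack.length : Int) then PySem.List.pySetD forward i true else forward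
  let stack :=
    if stack.isEmpty then stack ++ [PySem.List.pyGetD nums i 0]
    else if PySem.List.pyGetD nums i 0 ≤ PySem.List.pyGetD stack (-1) 0 then
      stack ++ [PySem.List.pyGetD nums i 0]
    else [PySem.List.pyGetD nums i 0]
  (forward, stack)

def stepBwd (nums : List Int) (k : Int) (forward : List Bool) (s : List Int × List Int) (i : Int) :
    List Int × List Int :=
  let res := s.1
  let stack := s.2
  let res :=
    if k ≤ (stack.length : Int) ∧ PySem.List.pyGetD forward i false = true then res ++ [i]
    else res
  let stack :=
    if stack.isEmpty then stack ++ [PySem.List.pyGetD nums i 0]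
    else if PySem.List.pyGetD nums i 0 ≤ PySem.List.pyGetD stack (-1) 0 then
      stack ++ [PySem.List.pyGetD nums i 0]
    else [PySem.List.pyGetD nums i 0]
  (res, stack)

def fwdState (nums : List Int) (k : Int) (m : ℕ) : List Bool × List Int :=
  (PySem.List.pyRange 0 (m : Int) 1).foldl (stepFwd nums k)
    (PySem.List.pyRepeat [false] ((nums.length : Int)), ([] : List Int))

def condA (nums : List Int) (k : Int) (fw : List Bool) (i : Int) : Bool :=
  decide (k ≤ ((runF (gBw nums) (nums.length - 1 - i.toNat) : ℕ) : Int) ∧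
    PySem.List.pyGetD fw i false = true)

lemma getD_set_if (xs : List Int) (m j : ℕ) (v d : Int) (hj : j < xs.length) :
    (xs.set m v).getD j d = if j = m ∧ m < xs.length then v else xs.getD j d := by
  rw [List.getD_eq_getElem?_getD, List.getElem?_set]
  by_cases h : j = m
  · subst h
    by_cases hm : j < xs.length <;> simp [hm, List.getD_eq_getElem?_getD]
  · rw [if_neg (by omega), if_neg (by tauto)]
    rw [List.getD_eq_getElem?_getD]

lemma getD_set_if_bool (xs : List Bool) (m j : ℕ) (v d : Bool) (hj : j < xs.length) :
    (xs.set m v).getD j d = if j = m ∧ m < xs.length then v else xs.getD j d := by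
  rw [List.getD_eq_getElem?_getD, List.getElem?_set]
  by_cases h : j = m
  · subst h
    by_cases hm : j < xs.length <;> simp [hm, List.getD_eq_getElem?_getD]
  · rw [if_neg (by omega), if_neg (by tauto)]
    rw [List.getD_eq_getElem?_getD]

lemma pushRun_ne_nil (s : List Int) (x : Int) : pushRun s x ≠ [] := by
  unfold pushRun; split_ifs <;> simp

lemma pushRun_last (s : List Int) (x : Int) :
    PySem.List.pyGetD (pushRun s x) (-1) 0 = x := by
  unfold pushRun
  have h0 : ([x] : List Int) = [] ++ [x] := rfl
  split_ifs
  · rw [PySem.List.pyGetD_neg_one_append_singleton]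
  · rw [PySem.List.pyGetD_neg_one_append_singleton]
  · rw [h0, PySem.List.pyGetD_neg_one_append_singleton]

lemma stk_last (g : ℕ → Int) (p : ℕ) :
    PySem.List.pyGetD (stkF g (p + 1)) (-1) 0 = g p := by
  simp [stkF, pushRun_last]

lemma stk_length (g : ℕ → Int) : ∀ p, (stkF g p).length = runF g p := by
  intro p
  induction p with
  | zero => rfl
  | succ q ih =>
    cases q with
    | zero => simp [stkF, pushRun, runF]
    | succ r =>
      have hne : stkF g (r + 1) ≠ [] := pushRun_ne_nil _ _
      show (pushRun (stkF g (r + 1)) (g (r + 1))).length = runF g (r + 2)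
      rw [pushRun, runF, if_neg (by simpa [List.isEmpty_iff] using hne), stk_last]
      split_ifs with h <;> simp [ih]

lemma stepFwd_fst (nums : List Int) (k : Int) (s : List Bool × List Int) (i : Int) :
    (stepFwd nums k s i).1 = if k ≤ (s.2.length : Int) then PySem.List.pySetD s.1 i true else s.1 := rfl

lemma stepFwd_snd (nums : List Int) (k : Int) (s : List Bool × List Int) (i : Int) :
    (stepFwd nums k s i).2 = pushRun s.2 (PySem.List.pyGetD nums i 0) := rfl

lemma fwd_inv (nums : List Int) (k : Int) (m : ℕ) (hm : m ≤ nums.length) :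
    (fwdState nums k m).2 = stkF (gFw nums) m ∧
    (fwdState nums k m).1.length = nums.length ∧
    ∀ j, j < nums.length →
      (fwdState nums k m).1.getD j false =
        (decide (j < m) && decide (k ≤ ((runF (gFw nums) j : ℕ) : Int))) := by
  induction m with
  | zero =>
    refine ⟨rfl, ?_, ?_⟩
    · simp [fwdState, PySem.List.pyRange_one_eq_nil, PySem.List.pyRepeat_singleton]
    · intro j hj
      simp [fwdState, PySem.List.pyRange_one_eq_nil, PySem.List.pyRepeat_singleton,
        List.getD_replicate _ hj]
  | succ m ih =>
    have hm' : m ≤ nums.length := Nat.le_of_succ_le hm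
    obtain ⟨hs, hlen, hget⟩ := ih hm'
    have hr : PySem.List.pyRange 0 ((m + 1 : ℕ) : Int) 1
        = PySem.List.pyRange 0 (m : Int) 1 ++ [(m : Int)] := by
      push_cast
      exact PySem.List.pyRange_one_succ_right (by positivity)
    have hstate : fwdState nums k (m + 1) = stepFwd nums k (fwdState nums k m) (m : Int) := by
      unfold fwdState
      rw [hr, List.foldl_append]
      rfl
    rw [hstate]
    refine ⟨?_, ?_, ?_⟩
    · rw [stepFwd_snd, hs]
      simp [stkF, gFw]
    · rw [stepFwd_fst]
      split_ifs <;> simp [hlen]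
    · intro j hj
      rw [stepFwd_fst, hs, stk_length]
      by_cases hk : k ≤ ((runF (gFw nums) m : ℕ) : Int)
      · rw [if_pos hk]
        simp only [PySem.List.pySetD_natCast]
        rw [getD_set_if_bool _ _ _ _ _ (by omega)]
        by_cases hjm : j = m
        · subst hjm
          rw [if_pos ⟨rfl, by omega⟩]
          simp [hk]
        · rw [if_neg (by tauto), hget j hj,
            show (decide (j < m + 1)) = decide (j < m) from decide_eq_decide.mpr (by omega)]
      · rw [if_neg hk, hget j hj]
        by_cases hjm : j = m
        · subst hjm
          simp [hk]
        · rw [show (decide (j < m + 1)) = decide (j < m) from decide_eq_decide.mpr (by omega)]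

lemma stepBwd_fst (nums : List Int) (k : Int) (fw : List Bool) (s : List Int × List Int) (i : Int) :
    (stepBwd nums k fw s i).1 =
      if k ≤ (s.2.length : Int) ∧ PySem.List.pyGetD fw i false = true then s.1 ++ [i] else s.1 := rfl

lemma stepBwd_snd (nums : List Int) (k : Int) (fw : List Bool) (s : List Int × List Int) (i : Int) :
    (stepBwd nums k fw s i).2 = pushRun s.2 (PySem.List.pyGetD nums i 0) := rfl

def bwdState (nums : List Int) (k : Int) (fw : List Bool) (m : ℕ) (res : List Int) :
    List Int × List Int :=
  (PySem.List.pyRange ((m : Int) - 1) (-1) (-1)).foldl (stepBwd nums k fw)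
    (res, stkF (gBw nums) (nums.length - m))

lemma bwd_inv (nums : List Int) (k : Int) (fw : List Bool) (m : ℕ) (hm : m ≤ nums.length)
    (res : List Int) :
    bwdState nums k fw m res =
      (res ++ ((PySem.List.pyRange 0 (m : Int) 1).filter (condA nums k fw)).reverse,
        stkF (gBw nums) nums.length) := by
  induction m generalizing res with
  | zero =>
    unfold bwdState
    simp [PySem.List.pyRange_neg_one_eq_nil, PySem.List.pyRange_one_eq_nil]
  | succ m ih =>
    have hm' : m ≤ nums.length := Nat.le_of_succ_le hm
    have hr : PySem.List.pyRange ((↑(m + 1) : Int) - 1) (-1) (-1)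
        = (m : Int) :: PySem.List.pyRange ((m : Int) - 1) (-1) (-1) := by
      push_cast
      rw [add_sub_cancel_right]
      exact PySem.List.pyRange_neg_one_cons (by omega)
    have hstack : (stepBwd nums k fw (res, stkF (gBw nums) (nums.length - (m + 1))) (m : Int)).2
        = stkF (gBw nums) (nums.length - m) := by
      rw [stepBwd_snd, show nums.length - m = (nums.length - (m + 1)) + 1 from by omega]
      show pushRun _ _ = pushRun _ (gBw nums (nums.length - (m + 1)))
      congr 1
      simp [gBw, show nums.length - 1 - (nums.length - (m + 1)) = m from by omega]
    have hres : (stepBwd nums k fw (res, stkF (gBw nums) (nums.length - (m + 1))) (m : Int)).1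
        = res ++ (if condA nums k fw (m : Int) then [(m : Int)] else []) := by
      rw [stepBwd_fst, stk_length]
      have hce : (condA nums k fw (m : Int) = true) ↔
          (k ≤ ((runF (gBw nums) (nums.length - (m + 1)) : ℕ) : Int) ∧
            PySem.List.pyGetD fw (m : Int) false = true) := by
        simp [condA, Int.toNat_natCast,
          show nums.length - 1 - m = nums.length - (m + 1) from by omega]
      rw [if_congr hce rfl rfl]
      split_ifs <;> simp
    have hpair : stepBwd nums k fw (res, stkF (gBw nums) (nums.length - (m + 1))) (m : Int)
        = (res ++ (if condA nums k fw (m : Int) then [(m : Int)] else []),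
            stkF (gBw nums) (nums.length - m)) := Prod.ext hres hstack
    have hfold := ih hm' (res ++ (if condA nums k fw (m : Int) then [(m : Int)] else []))
    unfold bwdState at hfold ⊢
    rw [hr, List.foldl_cons, hpair, hfold]
    have hr2 : PySem.List.pyRange 0 ((↑(m + 1) : Int)) 1
        = PySem.List.pyRange 0 (m : Int) 1 ++ [(m : Int)] := by
      push_cast
      exact PySem.List.pyRange_one_succ_right (by positivity)
    rw [hr2, List.filter_append, List.reverse_append, List.append_assoc]
    congr 1
    rw [List.filter_singleton]
    split_ifs with h
    · simp [h]
    · simp [h]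

-- A's result, characterised: the indices i of [0, n) whose backward run (starting at i+1,
-- read from the right) and forward run (ending at i-1) both have length ≥ k.
lemma A_filter (nums : List Int) (k : Int) :
    goodIndices nums k =
      (PySem.List.pyRange 0 ((nums.length : Int)) 1).filter
        (fun i => decide (k ≤ ((runF (gBw nums) (nums.length - 1 - i.toNat) : ℕ) : Int) ∧
                          k ≤ ((runF (gFw nums) i.toNat : ℕ) : Int))) := by
  have hA : goodIndices nums k =
      (PySem.List.slice?
        (bwdState nums k ((fwdState nums k nums.length).1) nums.length []).1
        none none (-1)).getD [] := by
    unfold goodIndices bwdState fwdState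
    rw [Nat.sub_self]
    rfl
  rw [hA, bwd_inv nums k _ nums.length le_rfl []]
  simp only [PySem.List.slice?_none_none_neg_one, Option.getD_some, List.nil_append,
    List.reverse_reverse]
  apply List.filter_congr
  intro i hi
  obtain ⟨h0i, hin⟩ := (PySem.List.mem_pyRange_one).mp hi
  obtain ⟨j, rfl⟩ : ∃ j : ℕ, i = (j : Int) := ⟨i.toNat, (Int.toNat_of_nonneg h0i).symm⟩
  have hjlen : j < nums.length := by exact_mod_cast hin
  obtain ⟨hsF, hlenF, hgetF⟩ := fwd_inv nums k nums.length le_rfl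
  have hfw : PySem.List.pyGetD ((fwdState nums k nums.length).1) ((j : ℕ) : Int) false
      = decide (k ≤ ((runF (gFw nums) j : ℕ) : Int)) := by
    rw [PySem.List.pyGetD_natCast, hgetF j hjlen, decide_eq_true (by omega : j < nums.length)]
    simp
  simp [condA, Int.toNat_natCast, hfw]

-- ---------- the run length read off from break counts ----------

-- runF never exceeds the number of elements fed
lemma runF_le (g : ℕ → Int) : ∀ p, runF g p ≤ p := by
  intro p
  induction p with
  | zero => simp [runF]
  | succ q ih =>
    cases q with
    | zero => simp [runF]
    | succ r =>
      show runF g (r + 2) ≤ r + 2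
      rw [runF]
      split_ifs <;> omega

-- a run of length ≥ kn ends at p-1 iff p ≥ kn and there is no break in the last kn positions
lemma runF_ge_iff (g : ℕ → Int) :
    ∀ p kn, 1 ≤ kn →
      (kn ≤ runF g p ↔ kn ≤ p ∧ ∀ j, p - kn < j → j < p → g j ≤ g (j - 1)) := by
  intro p
  induction p with
  | zero =>
    intro kn hk
    simp only [runF]
    constructor
    · omega
    · rintro ⟨h, -⟩; omega
  | succ q ih =>
    intro kn hk
    cases q with
    | zero =>
      simp only [runF]
      constructor
      · intro h
        exact ⟨h, by omega⟩
      · rintro ⟨h, -⟩; exact h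
    | succ r =>
      show kn ≤ runF g (r + 2) ↔ _
      rw [runF]
      by_cases hg : g (r + 1) ≤ g r
      · rw [if_pos hg]
        by_cases hk1 : kn = 1
        · subst hk1
          constructor
          · intro _
            exact ⟨by omega, by omega⟩
          · intro _
            omega
        · have h2 : 2 ≤ kn := by omega
          have ihr := ih (kn - 1) (by omega)
          constructor
          · intro h
            have := ihr.mp (by omega)
            refine ⟨by omega, ?_⟩
            intro j hj1 hj2
            by_cases hje : j = r + 1
            · subst hje; simpa using hg
            · exact this.2 j (by omega) (by omega)
          · rintro ⟨hp, hall⟩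
            have : kn - 1 ≤ runF g (r + 1) := by
              apply ihr.mpr
              refine ⟨by omega, ?_⟩
              intro j hj1 hj2
              exact hall j (by omega) (by omega)
            omega
      · rw [if_neg hg]
        constructor
        · intro h
          have hk1 : kn = 1 := by omega
          subst hk1
          exact ⟨by omega, by omega⟩
        · rintro ⟨hp, hall⟩
          by_cases hk1 : kn = 1
          · omega
          · exact absurd (hall (r + 1) (by omega) (by omega)) hg

-- ---------- prefix counts of breaks ----------

-- number (as Int) of positions t' < t with br t'
def cntF (br : ℕ → Bool) : ℕ → Int
  | 0 => 0
  | t + 1 => cntF br t + (if br t then 1 else 0)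

def brI (nums : List Int) (t : ℕ) : Bool := decide (nums.getD t 0 < nums.getD (t + 1) 0)
def brD (nums : List Int) (t : ℕ) : Bool := decide (nums.getD (t + 1) 0 < nums.getD t 0)

lemma cntF_mono (br : ℕ → Bool) (a : ℕ) : ∀ b, a ≤ b → cntF br a ≤ cntF br b := by
  intro b
  induction b with
  | zero =>
    intro h
    have ha : a = 0 := by omega
    subst ha
    exact le_rfl
  | succ b ih =>
    intro h
    rcases Nat.lt_or_ge a (b + 1) with h1 | h1
    · have := ih (by omega)
      simp only [cntF]
      split_ifs <;> omega
    · have ha : a = b + 1 := by omega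
      subst ha
      exact le_rfl

lemma cntF_eq_iff (br : ℕ → Bool) (a : ℕ) :
    ∀ b, a ≤ b → (cntF br a = cntF br b ↔ ∀ t, a ≤ t → t < b → br t = false) := by
  intro b
  induction b with
  | zero =>
    intro h
    have ha : a = 0 := by omega
    subst ha
    simp
  | succ b ih =>
    intro h
    rcases Nat.lt_or_ge a (b + 1) with h1 | h1
    · have hab : a ≤ b := by omega
      have hmono : cntF br a ≤ cntF br b := cntF_mono br a b hab
      have hstep : cntF br (b + 1) = cntF br b + (if br b then 1 else 0) := rfl
      constructor
      · intro he t ht1 ht2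
        have hbf : br b = false := by
          by_contra hbt
          simp only [ne_eq, Bool.not_eq_false] at hbt
          rw [hstep, if_pos hbt] at he
          omega
        rcases Nat.lt_or_ge t b with htb | htb
        · have heq : cntF br a = cntF br b := by
            rw [hstep, hbf] at he
            simpa using he
          exact (ih hab).mp heq t ht1 htb
        · have htb' : t = b := by omega
          subst htb'
          exact hbf
      · intro hall
        have heq : cntF br a = cntF br b := (ih hab).mpr (fun t h1 h2 => hall t h1 (by omega))
        rw [hstep, hall b (by omega) (by omega)]
        simpa using heq
    · have ha : a = b + 1 := by omega
      subst ha
      constructor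
      · intro _ t ht1 ht2
        omega
      · intro _
        rfl

-- ---------- B's table-building loop ----------

def tabsState (nums : List Int) (m : ℕ) : List Int × List Int :=
  (PySem.List.pyRange 1 (m : Int) 1).foldl (stepTab nums)
    (PySem.List.pyRepeat [0] ((nums.length : Int)), PySem.List.pyRepeat [0] ((nums.length : Int)))

lemma tabs_inv (nums : List Int) : ∀ m, m ≤ nums.length →
    (tabsState nums m).1.length = nums.length ∧ (tabsState nums m).2.length = nums.length ∧
    (∀ j, j < nums.length →
      (tabsState nums m).1.getD j 0 = if j < m then cntF (brI nums) j else 0) ∧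
    (∀ j, j < nums.length →
      (tabsState nums m).2.getD j 0 = if j < m then cntF (brD nums) j else 0) := by
  have hbase : ∀ m : ℕ, (m : Int) ≤ 1 → tabsState nums m =
      (PySem.List.pyRepeat [0] ((nums.length : Int)), PySem.List.pyRepeat [0] ((nums.length : Int))) := by
    intro m hm
    unfold tabsState
    rw [PySem.List.pyRange_one_eq_nil hm, List.foldl_nil]
  have hrep : ∀ j, j < nums.length →
      (PySem.List.pyRepeat ([0] : List Int) ((nums.length : Int))).getD j 0 = 0 := by
    intro j hj
    rw [PySem.List.pyRepeat_singleton]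
    simp only [Int.toNat_natCast]
    exact List.getD_replicate _ hj
  have hreplen : (PySem.List.pyRepeat ([0] : List Int) ((nums.length : Int))).length = nums.length := by
    rw [PySem.List.pyRepeat_singleton]
    simp
  intro m
  induction m with
  | zero =>
    intro _
    rw [hbase 0 (by norm_num)]
    exact ⟨hreplen, hreplen, fun j hj => by rw [hrep j hj]; simp,
      fun j hj => by rw [hrep j hj]; simp⟩
  | succ m ih =>
    intro hm
    rcases Nat.eq_zero_or_pos m with h0 | hpos
    · subst h0
      rw [hbase 1 (by norm_num)]
      refine ⟨hreplen, hreplen, ?_, ?_⟩ <;>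
        · intro j hj
          rw [hrep j hj]
          by_cases hj0 : j < 1
          · interval_cases j
            simp [cntF]
          · rw [if_neg hj0]
    · have hm' : m ≤ nums.length := by omega
      obtain ⟨hl1, hl2, hg1, hg2⟩ := ih hm'
      have hr : PySem.List.pyRange 1 ((m + 1 : ℕ) : Int) 1
          = PySem.List.pyRange 1 (m : Int) 1 ++ [(m : Int)] := by
        push_cast
        exact PySem.List.pyRange_one_succ_right (by exact_mod_cast hpos)
      have hstate : tabsState nums (m + 1) = stepTab nums (tabsState nums m) (m : Int) := by
        unfold tabsState
        rw [hr, List.foldl_append]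
        rfl
      rw [hstate]
      have hcast : ((m : Int) - 1) = ((m - 1 : ℕ) : Int) := by
        push_cast [Nat.cast_sub hpos]; ring
      have hread1 : PySem.List.pyGetD (tabsState nums m).1 ((m : Int) - 1) 0
          = cntF (brI nums) (m - 1) := by
        rw [hcast, PySem.List.pyGetD_natCast, hg1 (m - 1) (by omega), if_pos (by omega)]
      have hread2 : PySem.List.pyGetD (tabsState nums m).2 ((m : Int) - 1) 0
          = cntF (brD nums) (m - 1) := by
        rw [hcast, PySem.List.pyGetD_natCast, hg2 (m - 1) (by omega), if_pos (by omega)]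
      have hn1 : PySem.List.pyGetD nums ((m : Int) - 1) 0 = nums.getD (m - 1) 0 := by
        rw [hcast, PySem.List.pyGetD_natCast]
      have hn2 : PySem.List.pyGetD nums ((m : Int)) 0 = nums.getD m 0 := by
        rw [PySem.List.pyGetD_natCast]
      have hm1 : m - 1 + 1 = m := by omega
      have hbr1 : (brI nums (m - 1) = true) ↔ nums.getD (m - 1) 0 < nums.getD m 0 := by
        simp [brI, hm1]
      have hbr2 : (brD nums (m - 1) = true) ↔ nums.getD m 0 < nums.getD (m - 1) 0 := by
        simp [brD, hm1]
      have hval1 : cntF (brI nums) (m - 1) +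
          (if PySem.List.pyGetD nums ((m : Int) - 1) 0 < PySem.List.pyGetD nums ((m : Int)) 0 then (1 : Int) else 0)
          = cntF (brI nums) m := by
        rw [hn1, hn2]
        conv_rhs => rw [← hm1]
        show _ = cntF (brI nums) (m - 1) + (if brI nums (m - 1) then 1 else 0)
        congr 1
        by_cases hc : nums.getD (m - 1) 0 < nums.getD m 0
        · rw [if_pos hc, if_pos (hbr1.mpr hc)]
        · rw [if_neg hc, if_neg (fun hh => hc (hbr1.mp hh))]
      have hval2 : cntF (brD nums) (m - 1) +
          (if PySem.List.pyGetD nums ((m : Int)) 0 < PySem.List.pyGetD nums ((m : Int) - 1) 0 then (1 : Int) else 0)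
          = cntF (brD nums) m := by
        rw [hn1, hn2]
        conv_rhs => rw [← hm1]
        show _ = cntF (brD nums) (m - 1) + (if brD nums (m - 1) then 1 else 0)
        congr 1
        by_cases hc : nums.getD m 0 < nums.getD (m - 1) 0
        · rw [if_pos hc, if_pos (hbr2.mpr hc)]
        · rw [if_neg hc, if_neg (fun hh => hc (hbr2.mp hh))]
      refine ⟨?_, ?_, ?_, ?_⟩
      · simp [stepTab, PySem.List.pySetD_natCast, hl1]
      · simp [stepTab, PySem.List.pySetD_natCast, hl2]
      · intro j hj
        show (PySem.List.pySetD (tabsState nums m).1 ((m : Int)) _).getD j 0 = _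
        rw [hread1, hval1, PySem.List.pySetD_natCast, getD_set_if _ _ _ _ _ (by omega)]
        by_cases hjm : j = m
        · subst hjm
          rw [if_pos ⟨rfl, by omega⟩, if_pos (by omega)]
        · rw [if_neg (by tauto), hg1 j hj,
            if_congr (show (j < m + 1) ↔ (j < m) from by omega) rfl rfl]
      · intro j hj
        show (PySem.List.pySetD (tabsState nums m).2 ((m : Int)) _).getD j 0 = _
        rw [hread2, hval2, PySem.List.pySetD_natCast, getD_set_if _ _ _ _ _ (by omega)]
        by_cases hjm : j = m
        · subst hjm
          rw [if_pos ⟨rfl, by omega⟩, if_pos (by omega)]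
        · rw [if_neg (by tauto), hg2 j hj,
            if_congr (show (j < m + 1) ↔ (j < m) from by omega) rfl rfl]

-- ---------- bounds: A's condition forces i into [k, n-k) ----------

lemma condA_bounds (nums : List Int) (k : Int) (j : ℕ) (hj : j < nums.length) (hk : 1 ≤ k)
    (h : k ≤ ((runF (gBw nums) (nums.length - 1 - j) : ℕ) : Int) ∧
         k ≤ ((runF (gFw nums) j : ℕ) : Int)) :
    k ≤ (j : Int) ∧ (j : Int) < (nums.length : Int) - k := by
  have h1 := runF_le (gFw nums) j
  have h2 := runF_le (gBw nums) (nums.length - 1 - j)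
  obtain ⟨ha, hb⟩ := h
  constructor
  · calc k ≤ ((runF (gFw nums) j : ℕ) : Int) := hb
      _ ≤ (j : Int) := by exact_mod_cast h1
  · have hlen : 1 + j ≤ nums.length := by
      by_contra hcon
      push_neg at hcon
      rw [show nums.length - 1 - j = 0 from by omega] at ha
      simp [runF] at ha
      omega
    have h2' : ((runF (gBw nums) (nums.length - 1 - j) : ℕ) : Int)
        ≤ ((nums.length - 1 - j : ℕ) : Int) := by exact_mod_cast h2
    omega

-- ---------- the window bridge: A's run conditions = B's prefix-count conditions ----------

lemma bridge (nums : List Int) (k : Int) (hk : 1 ≤ k) (j : ℕ)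
    (hj1 : k ≤ (j : Int)) (hj2 : (j : Int) < (nums.length : Int) - k) :
    ((k ≤ ((runF (gBw nums) (nums.length - 1 - j) : ℕ) : Int) ∧
      k ≤ ((runF (gFw nums) j : ℕ) : Int)) ↔
     (PySem.List.pyGetD (tabsState nums nums.length).1 ((j : Int) - 1) 0 =
        PySem.List.pyGetD (tabsState nums nums.length).1 ((j : Int) - k) 0 ∧
      PySem.List.pyGetD (tabsState nums nums.length).2 ((j : Int) + k) 0 =
        PySem.List.pyGetD (tabsState nums nums.length).2 ((j : Int) + 1) 0)) := by
  obtain ⟨hl1, hl2, hg1, hg2⟩ := tabs_inv nums nums.length le_rfl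
  set kn := k.toNat with hkn
  have hkk : k = (kn : Int) := by omega
  have hkn1 : 1 ≤ kn := by omega
  have hjkn : kn ≤ j := by omega
  have hwin : j + kn < nums.length := by
    have : (j : Int) + k < (nums.length : Int) := by omega
    omega
  have hn1 : 1 ≤ nums.length := by omega
  -- table reads as prefix counts
  have hc1 : ((j : Int) - 1) = ((j - 1 : ℕ) : Int) := by push_cast [Nat.cast_sub (by omega : 1 ≤ j)]; ring
  have hc2 : ((j : Int) - k) = ((j - kn : ℕ) : Int) := by
    rw [hkk]; push_cast [Nat.cast_sub hjkn]; ring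
  have hc3 : ((j : Int) + k) = ((j + kn : ℕ) : Int) := by rw [hkk]; push_cast; ring
  have hc4 : ((j : Int) + 1) = ((j + 1 : ℕ) : Int) := by push_cast; ring
  rw [hc1, hc2, hc3, hc4, PySem.List.pyGetD_natCast, PySem.List.pyGetD_natCast,
    PySem.List.pyGetD_natCast, PySem.List.pyGetD_natCast,
    hg1 (j - 1) (by omega), hg1 (j - kn) (by omega),
    hg2 (j + kn) (by omega), hg2 (j + 1) (by omega),
    if_pos (by omega), if_pos (by omega), if_pos (by omega), if_pos (by omega)]
  -- run conditions as no-break conditions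
  have hrF : (k ≤ ((runF (gFw nums) j : ℕ) : Int)) ↔
      (kn ≤ j ∧ ∀ t, j - kn < t → t < j → gFw nums t ≤ gFw nums (t - 1)) := by
    rw [hkk, Int.ofNat_le]
    exact runF_ge_iff (gFw nums) j kn hkn1
  have hrB : (k ≤ ((runF (gBw nums) (nums.length - 1 - j) : ℕ) : Int)) ↔
      (kn ≤ nums.length - 1 - j ∧
       ∀ t, (nums.length - 1 - j) - kn < t → t < nums.length - 1 - j →
         gBw nums t ≤ gBw nums (t - 1)) := by
    rw [hkk, Int.ofNat_le]
    exact runF_ge_iff (gBw nums) (nums.length - 1 - j) kn hkn1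
  have heqI : (cntF (brI nums) (j - kn) = cntF (brI nums) (j - 1)) ↔
      (∀ t, j - kn ≤ t → t < j - 1 → brI nums t = false) :=
    cntF_eq_iff (brI nums) (j - kn) (j - 1) (by omega)
  have heqD : (cntF (brD nums) (j + 1) = cntF (brD nums) (j + kn)) ↔
      (∀ t, j + 1 ≤ t → t < j + kn → brD nums t = false) :=
    cntF_eq_iff (brD nums) (j + 1) (j + kn) (by omega)
  have SF : (k ≤ ((runF (gFw nums) j : ℕ) : Int)) ↔
      (cntF (brI nums) (j - 1) = cntF (brI nums) (j - kn)) := by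
    rw [hrF, eq_comm, heqI]
    constructor
    · rintro ⟨-, hF⟩ t ht1 ht2
      have := hF (t + 1) (by omega) (by omega)
      simp only [gFw, Nat.add_sub_cancel] at this
      simp only [brI, decide_eq_false_iff_not, not_lt]
      omega
    · intro hall
      refine ⟨hjkn, ?_⟩
      intro t ht1 ht2
      have := hall (t - 1) (by omega) (by omega)
      simp only [brI, show t - 1 + 1 = t from by omega, decide_eq_false_iff_not, not_lt] at this
      simpa [gFw] using this
  have hknB : kn ≤ nums.length - 1 - j := by omega
  have SB : (k ≤ ((runF (gBw nums) (nums.length - 1 - j) : ℕ) : Int)) ↔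
      (cntF (brD nums) (j + kn) = cntF (brD nums) (j + 1)) := by
    rw [hrB, eq_comm, heqD]
    constructor
    · rintro ⟨-, hB⟩ u hu1 hu2
      have h := hB (nums.length - 1 - u) (by omega) (by omega)
      simp only [gBw, show nums.length - 1 - (nums.length - 1 - u) = u from by omega,
        show nums.length - 1 - (nums.length - 1 - u - 1) = u + 1 from by omega] at h
      simp only [brD, decide_eq_false_iff_not, not_lt]
      omega
    · intro hall
      refine ⟨hknB, ?_⟩
      intro t ht1 ht2
      have h := hall (nums.length - 1 - t) (by omega) (by omega)
      simp only [brD, show nums.length - 1 - t + 1 = nums.length - t from by omega,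
        decide_eq_false_iff_not, not_lt] at h
      simp only [gBw, show nums.length - 1 - (t - 1) = nums.length - t from by omega]
      exact h
  rw [SF, SB]
  tauto

-- ---------- main equality ----------

lemma main_eq (nums : List Int) (k : Int) : goodIndices nums k = goodIndices_alt nums k := by
  rw [A_filter]
  by_cases hk : k ≤ 0
  · show _ = if k ≤ 0 then _ else _
    rw [if_pos hk]
    apply List.filter_eq_self.mpr
    intro i _
    apply decide_eq_true
    exact ⟨le_trans hk (Int.natCast_nonneg _), le_trans hk (Int.natCast_nonneg _)⟩
  · have hk1 : 1 ≤ k := by omega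
    have hB : goodIndices_alt nums k =
        (PySem.List.pyRange k ((nums.length : Int) - k) 1).filter
          (fun i => decide
            (PySem.List.pyGetD (tabsState nums nums.length).1 (i - 1) 0 =
               PySem.List.pyGetD (tabsState nums nums.length).1 (i - k) 0 ∧
             PySem.List.pyGetD (tabsState nums nums.length).2 (i + k) 0 =
               PySem.List.pyGetD (tabsState nums nums.length).2 (i + 1) 0)) := by
      show (if k ≤ 0 then _ else _) = _
      rw [if_neg hk]
      rw [PySem.List.foldl_append_ite_eq_filter]
      rfl
    rw [hB]
    have hnil : ∀ (a b : Int), (∀ i, a ≤ i → i < b → ¬(k ≤ i ∧ i < (nums.length : Int) - k)) →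
        (PySem.List.pyRange a b 1).filter
          (fun i => decide (k ≤ ((runF (gBw nums) (nums.length - 1 - i.toNat) : ℕ) : Int) ∧
                            k ≤ ((runF (gFw nums) i.toNat : ℕ) : Int))) = [] := by
      intro a b hbound
      apply List.filter_eq_nil_iff.mpr
      intro i hi
      obtain ⟨hai, hib⟩ := (PySem.List.mem_pyRange_one).mp hi
      simp only [decide_eq_true_eq]
      intro hcond
      by_cases h0 : 0 ≤ i
      · obtain ⟨j, rfl⟩ : ∃ j : ℕ, i = (j : Int) := ⟨i.toNat, (Int.toNat_of_nonneg h0).symm⟩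
        simp only [Int.toNat_natCast] at hcond
        have hjlen : j < nums.length := by
          have h1 := runF_le (gFw nums) j
          have h2 : k ≤ ((runF (gFw nums) j : ℕ) : Int) := hcond.2
          by_contra hcon
          push_neg at hcon
          have : runF (gBw nums) (nums.length - 1 - j) = runF (gBw nums) 0 := by
            rw [show nums.length - 1 - j = 0 from by omega]
          rw [this] at hcond
          have := hcond.1
          simp [runF] at this
          omega
        exact hbound _ hai hib (condA_bounds nums k j hjlen hk1 hcond)
      · exact absurd hcond.2 (by
          have := runF_le (gFw nums) i.toNat
          have : i.toNat = 0 := by omega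
          rw [this]
          simp [runF]
          omega)
    by_cases hle : (nums.length : Int) - k ≤ k
    · rw [PySem.List.pyRange_one_eq_nil hle, List.filter_nil]
      exact hnil 0 (nums.length : Int) (fun i h1 h2 h3 => by omega)
    · have hlt : k < (nums.length : Int) - k := by omega
      have h0k : 0 ≤ k := by omega
      rw [PySem.List.pyRange_one_append 0 k ((nums.length : Int)) h0k (by omega),
        PySem.List.pyRange_one_append k ((nums.length : Int) - k) ((nums.length : Int))
          (by omega) (by omega),
        List.filter_append, List.filter_append,
        hnil 0 k (fun i h1 h2 h3 => by omega),
        hnil ((nums.length : Int) - k) (nums.length : Int) (fun i h1 h2 h3 => by omega),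
        List.nil_append, List.append_nil]
      apply List.filter_congr
      intro i hi
      obtain ⟨hai, hib⟩ := (PySem.List.mem_pyRange_one).mp hi
      obtain ⟨j, rfl⟩ : ∃ j : ℕ, i = (j : Int) := ⟨i.toNat, (Int.toNat_of_nonneg (by omega)).symm⟩
      exact decide_eq_decide.mpr (bridge nums k hk1 j hai hib)

-- ===== VERDICT (by name: the statement is the Claim_ definition above) =====
theorem goodIndices_spec : Claim_equal_goodIndices := by
  intro nums k _
  unfold Spec_goodIndices
  exact main_eq nums k
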